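-- pv_equiv track=rewrite | github.com/fpietka/adventofcode_2019 | day_04.py | have_adjacent_but_not_larger
-- ===== SOURCE A (Python) =====
-- def have_adjacent_but_not_larger(digit):
--     data = str(digit)
--     for i in range(0, len(data) - 1):
--         tested = data[i:i+2]
--         if tested[0] == tested[1]:
--             if tested[0] == data[i-1:i] or tested[0] == data[i+2:i+3]:
--                 pass
--             else:
--                 return True
--
--     return False
-- ===== SOURCE B (Python) =====
-- from itertools import groupby
--
--
-- def have_adjacent_but_not_larger(digit):
--     return any(sum(1 for _ in group) == 2 for _, group in groupby(str(digit)))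
-- ===== Notes on version B (the rewrite author's own statement) =====
-- stated objective: idiomatic
-- what changed: Replaces the index-based sliding window that peeks at neighbour slices with a run-length grouping via itertools.groupby followed by a scan for a group of length exactly 2.
import Mathlib
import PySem

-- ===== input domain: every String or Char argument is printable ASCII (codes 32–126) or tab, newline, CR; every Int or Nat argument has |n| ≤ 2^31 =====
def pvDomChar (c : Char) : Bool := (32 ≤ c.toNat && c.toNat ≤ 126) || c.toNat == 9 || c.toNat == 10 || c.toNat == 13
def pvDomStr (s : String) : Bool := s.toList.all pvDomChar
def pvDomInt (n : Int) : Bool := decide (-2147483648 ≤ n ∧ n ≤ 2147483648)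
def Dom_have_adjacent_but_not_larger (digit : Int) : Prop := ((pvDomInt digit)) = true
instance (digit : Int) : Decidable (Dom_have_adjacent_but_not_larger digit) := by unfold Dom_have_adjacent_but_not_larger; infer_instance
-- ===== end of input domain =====

-- B replaces A's index-based sliding window (peeking at neighbour slices) by run-length
-- grouping (itertools.groupby) followed by a scan for a group of length exactly 2 (idiomatic).

-- ===== PORT A =====
-- A's loop over i in range(0, len(data)-1) inspects the window data[i-1:i], data[i], data[i+1],
-- data[i+2:i+3].  We port it as the equivalent structural recursion carrying the previous
-- character: at each step `a` is data[i], `b` is data[i+1], the slice data[i-1:i] is exactly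
-- `prev` (none ↔ the empty slice at i = 0), and the slice data[i+2:i+3] is exactly `rest.head?`
-- (none ↔ the empty slice at i+2 = len).  Branch order and early return are kept.
def pvLoopA (prev : Option Char) : List Char → Bool
  | a :: b :: rest =>
    if a = b then
      if prev = some a ∨ rest.head? = some a then pvLoopA (some a) (b :: rest)
      else true
    else pvLoopA (some a) (b :: rest)
  | _ => false

def have_adjacent_but_not_larger (digit : Int) : Bool :=
  pvLoopA none (PySem.Int.toChars digit)

-- ===== PORT B =====
-- itertools.groupby(str(digit)) ported as an explicit run-length grouping (char, run length).
def pvRuns : List Char → List (Char × Nat)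
  | [] => []
  | c :: rest =>
    match pvRuns rest with
    | (d, n) :: t => if c = d then (d, n + 1) :: t else (c, 1) :: (d, n) :: t
    | [] => [(c, 1)]

def have_adjacent_but_not_larger_alt (digit : Int) : Bool :=
  (pvRuns (PySem.Int.toChars digit)).any (fun p => p.2 == 2)

-- ===== PRECONDITION & SPEC =====
def Spec_have_adjacent_but_not_larger (digit : Int) (out : Bool) : Prop := out = have_adjacent_but_not_larger_alt digit
instance (digit : Int) (out : Bool) : Decidable (Spec_have_adjacent_but_not_larger digit out) := by unfold Spec_have_adjacent_but_not_larger; infer_instance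

-- ===== CLAIM (what is proved, stated in full; the proofs are below) =====
def Claim_equal_have_adjacent_but_not_larger : Prop := ∀ (digit : Int), Dom_have_adjacent_but_not_larger digit → Spec_have_adjacent_but_not_larger digit (have_adjacent_but_not_larger digit)

-- ===== LEMMAS AND PROOFS =====

-- Definitional unfoldings (used to rewrite without simp re-unfolding recursively).
lemma pvRuns_cons_eq (c : Char) (rest : List Char) :
    pvRuns (c :: rest) = (match pvRuns rest with
      | (d, n) :: t => if c = d then (d, n + 1) :: t else (c, 1) :: (d, n) :: t
      | [] => [(c, 1)]) := rfl

-- Split off the maximal leading run of `c`.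
def pvSplit1 (c : Char) : List Char → Nat × List Char
  | d :: r => if d = c then ((pvSplit1 c r).1 + 1, (pvSplit1 c r).2) else (0, d :: r)
  | [] => (0, [])

lemma pvSplit1_cons (c d : Char) (r : List Char) :
    pvSplit1 c (d :: r) =
      (if d = c then ((pvSplit1 c r).1 + 1, (pvSplit1 c r).2) else (0, d :: r)) := rfl

lemma pvLoopA_cons2 (prev : Option Char) (a b : Char) (rest : List Char) :
    pvLoopA prev (a :: b :: rest) =
      (if a = b then
        if prev = some a ∨ rest.head? = some a then pvLoopA (some a) (b :: rest)
        else true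
      else pvLoopA (some a) (b :: rest)) := rfl

lemma pvSplit1_spec (c : Char) : ∀ l : List Char,
    l = List.replicate (pvSplit1 c l).1 c ++ (pvSplit1 c l).2 ∧
    (pvSplit1 c l).2.head? ≠ some c ∧ (pvSplit1 c l).2.length ≤ l.length := by
  intro l
  induction l with
  | nil => simp [pvSplit1]
  | cons d r ih =>
    by_cases h : d = c
    · subst h
      obtain ⟨h1, h2, h3⟩ := ih
      rw [pvSplit1_cons, if_pos rfl]
      refine ⟨?_, h2, by simp only [List.length_cons]; omega⟩
      simp only [List.replicate_succ, List.cons_append]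
      exact congrArg _ h1
    · rw [pvSplit1_cons, if_neg h]
      refine ⟨by simp, by simpa using h, le_rfl⟩

lemma pvRuns_cons (c : Char) (rest : List Char) :
    ∃ n t, pvRuns (c :: rest) = (c, n) :: t := by
  induction rest generalizing c with
  | nil => exact ⟨1, [], rfl⟩
  | cons d r ih =>
    obtain ⟨m, t, hm⟩ := ih d
    by_cases h : c = d
    · subst h
      exact ⟨m + 1, t, by rw [pvRuns_cons_eq, hm]; simp⟩
    · exact ⟨1, (d, m) :: t, by rw [pvRuns_cons_eq, hm]; simp [h]⟩

lemma pvRuns_replicate_append (c : Char) (t : List Char) (ht : t.head? ≠ some c) :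
    ∀ n, 1 ≤ n → pvRuns (List.replicate n c ++ t) = (c, n) :: pvRuns t := by
  intro n
  induction n with
  | zero => omega
  | succ n ih =>
    intro _
    by_cases hn : 1 ≤ n
    · have hrec := ih hn
      rw [List.replicate_succ, List.cons_append, pvRuns_cons_eq, hrec]
      simp
    · have hn0 : n = 0 := by omega
      subst hn0
      cases t with
      | nil => rfl
      | cons d r =>
        obtain ⟨m, t', hm⟩ := pvRuns_cons d r
        have hdc : ¬ c = d := by intro h; exact ht (by simp [h])
        rw [show List.replicate 1 c ++ (d :: r) = c :: d :: r from rfl,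
          pvRuns_cons_eq, hm]
        simp [hdc, ← hm]

-- When the head differs from `c`, a pending previous char `c` is irrelevant.
lemma pvLoopA_skip (c : Char) (t : List Char) (ht : t.head? ≠ some c) :
    pvLoopA (some c) t = pvLoopA none t := by
  cases t with
  | nil => rfl
  | cons a r =>
    cases r with
    | nil => rfl
    | cons b s =>
      have hca : ¬ c = a := by intro h; exact ht (by simp [h])
      by_cases hab : a = b
      · subst hab
        rw [pvLoopA_cons2, pvLoopA_cons2]
        simp [hca]
      · rw [pvLoopA_cons2, pvLoopA_cons2, if_neg hab, if_neg hab]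

-- Inside a run of `c` that was already entered (prev = c), the loop just skips the run.
lemma pvLoopA_inrun (c : Char) (t : List Char) (ht : t.head? ≠ some c) :
    ∀ m, 1 ≤ m → pvLoopA (some c) (List.replicate m c ++ t) = pvLoopA none t := by
  intro m
  induction m with
  | zero => omega
  | succ m ih =>
    intro _
    by_cases hm : 1 ≤ m
    · have hrec := ih hm
      obtain ⟨m', hm'⟩ : ∃ m', m = m' + 1 := ⟨m - 1, by omega⟩
      subst hm'
      rw [List.replicate_succ, List.cons_append] at hrec ⊢
      rw [List.replicate_succ, List.cons_append, pvLoopA_cons2]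
      rw [if_pos rfl, if_pos (Or.inl rfl), hrec]
    · have hm0 : m = 0 := by omega
      subst hm0
      cases t with
      | nil => rfl
      | cons d r =>
        have hcd : ¬ c = d := by intro h; exact ht (by simp [h])
        rw [show List.replicate 1 c ++ (d :: r) = c :: d :: r from rfl,
          pvLoopA_cons2, if_neg hcd]
        exact pvLoopA_skip c (d :: r) ht

lemma pvLoopA_run (c : Char) (t : List Char) (ht : t.head? ≠ some c) :
    ∀ n, 1 ≤ n →
    pvLoopA none (List.replicate n c ++ t) = (decide (n = 2) || pvLoopA none t) := by
  intro n hn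
  match n, hn with
  | 1, _ =>
    cases t with
    | nil => simp [pvLoopA]
    | cons d r =>
      have hcd : ¬ c = d := by intro h; exact ht (by simp [h])
      rw [show List.replicate 1 c ++ (d :: r) = c :: d :: r from rfl,
        pvLoopA_cons2, if_neg hcd, pvLoopA_skip c (d :: r) ht]
      simp
  | 2, _ =>
    have hno : ¬ ((none : Option Char) = some c ∨ t.head? = some c) := by
      rintro (h | h)
      · simp at h
      · exact ht h
    have hl : List.replicate 2 c ++ t = c :: c :: t := by simp [List.replicate_succ]
    rw [hl, pvLoopA_cons2, if_pos rfl, if_neg hno]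
    simp
  | (k + 3), _ =>
    have hstep : pvLoopA (some c) (List.replicate (k + 2) c ++ t) = pvLoopA none t :=
      pvLoopA_inrun c t ht (k + 2) (by omega)
    have hl : List.replicate (k + 3) c ++ t = c :: (List.replicate (k + 2) c ++ t) := by
      simp [List.replicate_succ]
    have hl2 : List.replicate (k + 2) c ++ t = c :: (List.replicate (k + 1) c ++ t) := by
      simp [List.replicate_succ]
    have hhead : (List.replicate (k + 1) c ++ t).head? = some c := by
      simp [List.replicate_succ]
    rw [hl, hl2, pvLoopA_cons2, if_pos rfl, if_pos (Or.inr hhead), ← hl2, hstep]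
    have hk : ¬ (k + 3 = 2) := by omega
    simp [hk]

lemma pvMain : ∀ (N : Nat) (s : List Char), s.length ≤ N →
    pvLoopA none s = (pvRuns s).any (fun p => p.2 == 2) := by
  intro N
  induction N with
  | zero =>
    intro s hs
    have : s = [] := List.length_eq_zero_iff.mp (by omega)
    subst this; rfl
  | succ N ih =>
    intro s hs
    cases s with
    | nil => rfl
    | cons c r =>
      obtain ⟨h1, h2, h3⟩ := pvSplit1_spec c (c :: r)
      set n := (pvSplit1 c (c :: r)).1 with hn
      set t := (pvSplit1 c (c :: r)).2 with htdef
      have hn1 : 1 ≤ n := by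
        by_contra h
        have hz : n = 0 := by omega
        rw [hz] at h1
        simp only [List.replicate_zero, List.nil_append] at h1
        exact h2 (by rw [← h1]; rfl)
      have hlen : t.length ≤ N := by
        have hL : (c :: r).length = n + t.length := by rw [h1]; simp
        simp only [List.length_cons] at hL hs
        omega
      rw [h1, pvLoopA_run c t h2 n hn1, pvRuns_replicate_append c t h2 n hn1]
      rw [ih t hlen]
      simp only [List.any_cons]
      by_cases h : n = 2 <;> simp [h]

-- ===== VERDICT (by name: the statement is the Claim_ definition above) =====
theorem have_adjacent_but_not_larger_spec : Claim_equal_have_adjacent_but_not_larger := by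
  intro digit _
  unfold Spec_have_adjacent_but_not_larger have_adjacent_but_not_larger
    have_adjacent_but_not_larger_alt
  exact pvMain (PySem.Int.toChars digit).length _ le_rfl
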